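-- pv_equiv track=rewrite | github.com/Mootbing/ship-name-maker | shipname.py | ShipOneXY
-- ===== SOURCE A (Python) =====
-- def StartsWithAEIOU(AString):
--
--     L = AString[0].lower()
--
--     if (L == "a" or L == "e" or L == "i" or L == "o" or L == "u"):
--         return True
--
--     return False
--
-- def ShipOneXY(Syllabul1, Syllabul2):
--
--     Ships = []
--
--     for x in range(len(Syllabul1)):
--         for y in range(len(Syllabul2)):
--
--             if (StartsWithAEIOU(Syllabul1[x]) and x != 0):
--                 p1syllabul = Syllabul1[x - 1][len(Syllabul1[x - 1]) - 1] + Syllabul1[x]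
--             else:
--                 p1syllabul = Syllabul1[x]
--
--             if (StartsWithAEIOU(Syllabul2[y]) and y != 0):
--                 p2syllabul = Syllabul2[y - 1][len(Syllabul2[y - 1]) - 1] + Syllabul2[y]
--             else:
--                 p2syllabul = Syllabul2[y]
--
--             Ships.append(str(p1syllabul + p2syllabul).lower().capitalize())
--
--     return Ships
-- ===== SOURCE B (Python) =====
-- def StartsWithAEIOU(AString):
--     return AString[0].lower() in "aeiou"
--
-- def _adjusted(sylls):
--     # vowel-start syllables (except the first) get the previous syllable's last letter prepended
--     return sylls[:1] + [(p[-1:] + c) if StartsWithAEIOU(c) else c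
--                         for p, c in zip(sylls, sylls[1:])]
--
-- def ShipOneXY(Syllabul1, Syllabul2):
--     if not Syllabul1 or not Syllabul2:
--         return []
--     low1 = [s.lower() for s in _adjusted(Syllabul1)]
--     low2 = [s.lower() for s in _adjusted(Syllabul2)]
--     # capitalizing (h + t) is uppercasing the first letter of the lowered h
--     heads = [s[:1].upper() + s[1:] for s in low1]
--     return [h + t for h in heads for t in low2]
-- ===== Notes on version B (the rewrite author's own statement) =====
-- stated objective: alternative
-- what changed: B builds each list's vowel-adjusted syllables by zipping the list with its own tail, lowercases each list once and pre-capitalizes the first-part heads, so the cross product is plain string concatenation instead of A's per-pair index arithmetic plus lower().capitalize() recomputation.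
import Mathlib
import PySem

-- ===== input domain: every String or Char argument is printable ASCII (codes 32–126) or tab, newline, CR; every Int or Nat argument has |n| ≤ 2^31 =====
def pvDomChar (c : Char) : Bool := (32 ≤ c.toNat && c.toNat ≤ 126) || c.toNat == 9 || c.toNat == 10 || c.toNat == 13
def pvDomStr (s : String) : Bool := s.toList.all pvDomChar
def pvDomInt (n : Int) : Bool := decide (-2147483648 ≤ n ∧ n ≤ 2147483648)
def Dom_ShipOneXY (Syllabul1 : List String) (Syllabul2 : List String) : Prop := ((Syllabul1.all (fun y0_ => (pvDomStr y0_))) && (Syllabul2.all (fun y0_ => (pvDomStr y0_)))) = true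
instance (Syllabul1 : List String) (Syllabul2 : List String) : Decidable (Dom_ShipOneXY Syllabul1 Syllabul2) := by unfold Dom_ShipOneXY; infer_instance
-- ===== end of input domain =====

-- B precomputes each list's vowel-adjusted syllables via zip-with-tail, lowercases them once per
-- list, and builds the product by plain concatenation of a pre-capitalized head with a pre-lowered
-- tail — A instead recomputes the adjustment and lower().capitalize() inside the nested index loops.


-- ===== PORT A =====
-- StartsWithAEIOU: AString[0].lower() compared with the five vowels; AString[0] raises
-- IndexError on "", so Pre_ excludes empty syllables reached by the loops (none case unreached on Pre_).
def pvStartsWithAEIOU (s : String) : Bool :=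
  match PySem.Str.pyGet? s 0 with
  | some c =>
      let L := PySem.Chars.lowerChar c
      L == 'a' || L == 'e' || L == 'i' || L == 'o' || L == 'u'
  | none => false

-- s[len(s)-1] as a one-character list; the none case (s = "", IndexError) is unreached on Pre_.
def pvLastCharStr (s : String) : List Char :=
  match PySem.List.pyGet? s.toList ((s.toList.length : Int) - 1) with
  | some c => [c]
  | none => []

-- (…).lower().capitalize(): lowercase everything, then uppercase the first character
-- (exact on the ASCII domain Dom_, where capitalize's titlecase = uppercase).
def pvCap (cs : List Char) : List Char :=
  match PySem.Chars.lower cs with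
  | [] => []
  | c :: rest => PySem.Chars.upperChar c :: rest

-- the per-index adjusted syllable A computes inside the loop body (for either list)
def pvPiece (l : List String) (x : Int) : List Char :=
  let cur := PySem.List.pyGetD l x ""
  if pvStartsWithAEIOU cur && !(x == 0) then
    pvLastCharStr (PySem.List.pyGetD l (x - 1) "") ++ cur.toList
  else
    cur.toList

def ShipOneXY (Syllabul1 : List String) (Syllabul2 : List String) : List String :=
  (PySem.List.pyRange 0 (Syllabul1.length : Int) 1).foldl (fun ships x =>
    (PySem.List.pyRange 0 (Syllabul2.length : Int) 1).foldl (fun ships y =>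
      ships ++ [String.ofList (pvCap (pvPiece Syllabul1 x ++ pvPiece Syllabul2 y))]) ships) []

-- ===== PORT B =====
-- B's StartsWithAEIOU: AString[0].lower() in "aeiou" (substring membership of the 1-char string)
def pvStartsB (s : String) : Bool :=
  match PySem.Str.pyGet? s 0 with
  | some c => PySem.Chars.isIn [PySem.Chars.lowerChar c] "aeiou".toList
  | none => false

-- _adjusted: sylls[:1] + [(p[-1:] + c) if StartsWithAEIOU(c) else c for p, c in zip(sylls, sylls[1:])]
def pvAdjusted (l : List String) : List String :=
  PySem.List.slice l none (some 1) ++ (l.zip l.tail).map (fun pc =>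
    if pvStartsB pc.2
    then String.ofList (PySem.Chars.slice pc.1.toList (some (-1)) none ++ pc.2.toList)
    else pc.2)

-- s.lower()
def pvLowerStr (s : String) : String := String.ofList (PySem.Chars.lower s.toList)

-- s[:1].upper() + s[1:]
def pvCapFirst (s : String) : String :=
  String.ofList (PySem.Chars.upper (PySem.Chars.slice s.toList none (some 1)) ++
                 PySem.Chars.slice s.toList (some 1) none)

def ShipOneXY_alt (Syllabul1 : List String) (Syllabul2 : List String) : List String :=
  if Syllabul1.isEmpty || Syllabul2.isEmpty then []
  else
    let low1 := (pvAdjusted Syllabul1).map pvLowerStr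
    let low2 := (pvAdjusted Syllabul2).map pvLowerStr
    let heads := low1.map pvCapFirst
    heads.flatMap (fun h => low2.map (fun t => String.ofList (h.toList ++ t.toList)))

-- ===== PRECONDITION & SPEC =====
-- A raises IndexError (AString[0] on "") iff both lists are nonempty and some syllable is "";
-- Pre_ excludes exactly those inputs.
def Pre_ShipOneXY (Syllabul1 : List String) (Syllabul2 : List String) : Prop :=
  Syllabul1 = [] ∨ Syllabul2 = [] ∨ ((∀ s ∈ Syllabul1, s ≠ "") ∧ (∀ s ∈ Syllabul2, s ≠ ""))
instance (Syllabul1 : List String) (Syllabul2 : List String) : Decidable (Pre_ShipOneXY Syllabul1 Syllabul2) := by unfold Pre_ShipOneXY; infer_instance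

def pvWitness_ShipOneXY : List String × List String := (["mag", "ell", "an"], ["dor", "ia"])

def Spec_ShipOneXY (Syllabul1 : List String) (Syllabul2 : List String) (out : List String) : Prop := out = ShipOneXY_alt Syllabul1 Syllabul2
instance (Syllabul1 : List String) (Syllabul2 : List String) (out : List String) : Decidable (Spec_ShipOneXY Syllabul1 Syllabul2 out) := by unfold Spec_ShipOneXY; infer_instance

-- ===== CLAIM (what is proved, stated in full; the proofs are below) =====
def Claim_equal_ShipOneXY : Prop := ∀ (Syllabul1 : List String) (Syllabul2 : List String), Dom_ShipOneXY Syllabul1 Syllabul2 → Pre_ShipOneXY Syllabul1 Syllabul2 → Spec_ShipOneXY Syllabul1 Syllabul2 (ShipOneXY Syllabul1 Syllabul2)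

-- ===== LEMMAS AND PROOFS =====

-- proof-side normal form: the adjusted syllables as char lists, by prev-carrying recursion
def pvAdjChars (prev : Option String) : List String → List (List Char)
  | [] => []
  | cur :: rest =>
      (match prev with
       | some p => if pvStartsWithAEIOU cur then pvLastCharStr p ++ cur.toList else cur.toList
       | none => cur.toList) :: pvAdjChars (some cur) rest

-- B's vowel test agrees with A's
lemma startsB_eq (s : String) : pvStartsB s = pvStartsWithAEIOU s := by
  unfold pvStartsB pvStartsWithAEIOU
  cases PySem.Str.pyGet? s 0 with
  | none => rfl
  | some c =>
      simp only
      rw [Bool.eq_iff_iff, PySem.Chars.isIn_iff_infix, List.singleton_infix_iff]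
      simp [show ("aeiou".toList) = ['a','e','i','o','u'] from rfl]
      tauto

-- B's p[-1:] agrees with A's one-char list p[len(p)-1]
lemma lastSlice_eq (s : String) : PySem.Chars.slice s.toList (some (-1)) none = pvLastCharStr s := by
  unfold pvLastCharStr
  rw [PySem.Chars.slice_eq_listSlice, PySem.List.slice_from_neg_one]
  cases h : s.toList with
  | nil => rfl
  | cons c t =>
      have hne : (c :: t) ≠ ([] : List Char) := by simp
      rw [List.drop_length_sub_one hne]
      have hlen : ((c :: t).length : Int) - 1 = (((c :: t).length - 1 : Nat) : Int) := by
        simp [List.length_cons]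
      rw [hlen, PySem.List.pyGet?_natCast]
      rw [List.getElem?_eq_getElem (by simp [List.length_cons])]
      simp [List.getLast_eq_getElem]

-- the adjusted syllable at positive index i+1 of `full` only looks at full[i] and full[i+1]
lemma pvPiece_succ (full : List String) (i : Nat) (p c : String)
    (h : full.drop i = p :: c :: (full.drop (i + 2))) :
    pvPiece full ((i : Int) + 1) =
      (if pvStartsWithAEIOU c then pvLastCharStr p ++ c.toList else c.toList) := by
  have h1 : full[i + 1]? = some c := by
    rw [show i + 1 = i + 1 from rfl, ← List.getElem?_drop, h]; rfl
  have h0 : full[i]? = some p := by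
    rw [show i = i + 0 from rfl, ← List.getElem?_drop, h]; rfl
  have hx : ((i : Int) + 1) = ((i + 1 : Nat) : Int) := by push_cast; ring_nf
  have hc : PySem.List.pyGetD full ((i : Int) + 1) "" = c := by
    rw [hx, PySem.List.pyGetD_natCast]
    simp [List.getD_eq_getElem?_getD, h1]
  have hne : ((i : Int) + 1) ≠ 0 := by omega
  unfold pvPiece
  simp [hc, hne, h0]

-- prev-carrying normal form = index-based adjustment, for the suffix starting after position i
lemma adjChars_eq_map_piece_aux (full : List String) :
    ∀ (l : List String) (i : Nat) (p : String), full.drop i = p :: l →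
      (List.range l.length).map (fun k => pvPiece full ((i + 1 + k : Nat) : Int)) =
        pvAdjChars (some p) l := by
  intro l
  induction l with
  | nil => intro i p h; simp [pvAdjChars]
  | cons c t ih =>
    intro i p h
    have hdrop1 : full.drop (i + 1) = c :: t := by
      have h' := congrArg (List.drop 1) h
      simpa [List.drop_drop, show 1 + i = i + 1 by omega] using h'
    have hdrop2 : full.drop (i + 2) = t := by
      have h' := congrArg (List.drop 1) hdrop1
      simpa [List.drop_drop, show 1 + (i + 1) = i + 2 by omega] using h'
    have hfull : full.drop i = p :: c :: full.drop (i + 2) := by rw [hdrop2]; exact h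
    rw [List.length_cons, List.range_succ_eq_map, List.map_cons, List.map_map, pvAdjChars]
    congr 1
    · have := pvPiece_succ full i p c hfull
      rw [show ((i + 1 + 0 : Nat) : Int) = (i : Int) + 1 by push_cast; ring]
      simpa using this
    · rw [← ih (i + 1) c hdrop1]
      refine List.map_congr_left fun k _ => ?_
      simp only [Function.comp_apply]
      congr 1
      push_cast
      ring

-- A side: the index map over range(len(l)) is the prev-carrying normal form
lemma adjChars_eq_map_piece (l : List String) :
    (PySem.List.pyRange 0 (l.length : Int) 1).map (pvPiece l) = pvAdjChars none l := by
  rw [PySem.List.pyRange_one, List.map_map]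
  cases l with
  | nil => simp [pvAdjChars]
  | cons c t =>
    rw [show ((c :: t).length : Int) - 0 = ((c :: t).length : Nat) by ring]
    rw [Int.toNat_natCast, List.length_cons, List.range_succ_eq_map, List.map_cons, List.map_map,
      pvAdjChars]
    congr 1
    · simp [pvPiece, PySem.List.pyGetD_zero_cons]
    · rw [← adjChars_eq_map_piece_aux (c :: t) t 0 c (by simp)]
      refine List.map_congr_left fun k _ => ?_
      simp only [Function.comp_apply]
      congr 1
      push_cast
      ring

-- B side, zip part: mapping toList over the zip comprehension is the prev-carrying normal form
lemma adjusted_zip_eq (t : List String) : ∀ (p : String),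
    (((p :: t).zip t).map (fun pc =>
      (if pvStartsB pc.2
       then String.ofList (PySem.Chars.slice pc.1.toList (some (-1)) none ++ pc.2.toList)
       else pc.2).toList)) = pvAdjChars (some p) t := by
  induction t with
  | nil => intro p; rfl
  | cons c t ih =>
    intro p
    rw [List.zip_cons_cons, List.map_cons, ih c, pvAdjChars]
    congr 1
    rw [startsB_eq, lastSlice_eq]
    split
    · simp
    · rfl

-- B side: the adjusted strings, as char lists, are the prev-carrying normal form
lemma adjusted_toList (l : List String) :
    (pvAdjusted l).map String.toList = pvAdjChars none l := by
  unfold pvAdjusted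
  cases l with
  | nil => rfl
  | cons c t =>
    rw [PySem.List.slice_to _ (by omega), show ((1:Int).toNat) = 1 from rfl]
    rw [List.take_succ_cons, List.take_zero, List.map_append, List.map_map, pvAdjChars]
    simp only [List.map_cons, List.map_nil, List.cons_append, List.nil_append, List.tail_cons]
    congr 1
    exact adjusted_zip_eq t c

-- A as a flatMap of the two index maps
lemma shipOneXY_eq_flatMap (S1 S2 : List String) :
    ShipOneXY S1 S2 =
      ((PySem.List.pyRange 0 (S1.length : Int) 1).map (pvPiece S1)).flatMap (fun a =>
        ((PySem.List.pyRange 0 (S2.length : Int) 1).map (pvPiece S2)).map (fun b =>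
          String.ofList (pvCap (a ++ b)))) := by
  unfold ShipOneXY
  simp only [PySem.List.foldl_append_singleton_eq_map, PySem.List.foldl_append_eq_flatMap,
    List.nil_append, List.flatMap_map, List.map_map]
  rfl

-- capitalize distributes: for nonempty a, cap(lower(a ++ b)) = upper-first(lower a) ++ lower b
lemma cap_append (a b : List Char) (ha : a ≠ []) :
    pvCap (a ++ b) =
      PySem.Chars.upper ((PySem.Chars.lower a).take 1) ++ (PySem.Chars.lower a).tail ++
        PySem.Chars.lower b := by
  cases a with
  | nil => exact absurd rfl ha
  | cons c t =>
      unfold pvCap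
      simp [PySem.Chars.lower, PySem.Chars.upper]

-- every adjusted syllable is nonempty when all syllables are
lemma adjusted_ne_nil (l : List String) (h : ∀ u ∈ l, u ≠ "") :
    ∀ s ∈ pvAdjusted l, s.toList ≠ [] := by
  intro s hs
  unfold pvAdjusted at hs
  rw [PySem.List.slice_to _ (by omega), List.mem_append] at hs
  have toListNe : ∀ u : String, u ≠ "" → u.toList ≠ [] := by
    intro u hu hnil
    exact hu (String.toList_eq_nil_iff.mp hnil)
  rcases hs with hs | hs
  · exact toListNe s (h s (List.mem_of_mem_take hs))
  · rcases List.mem_map.mp hs with ⟨pc, hpc, rfl⟩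
    have hc : pc.2 ∈ l := (List.tail_sublist l).mem (List.of_mem_zip hpc).2
    have hc2 : pc.2.toList ≠ [] := toListNe pc.2 (h pc.2 hc)
    split
    · simp_all
    · exact hc2

-- pointwise congruence for flatMap over members
lemma flatMap_congr_mem {α β : Type} (l : List α) (f g : α → List β)
    (h : ∀ a ∈ l, f a = g a) : l.flatMap f = l.flatMap g := by
  induction l with
  | nil => rfl
  | cons x t ih =>
      simp only [List.flatMap_cons, h x (by simp), ih (fun a ha => h a (by simp [ha]))]

-- ===== VERDICT (by name: the statement is the Claim_ definition above) =====
set_option maxHeartbeats 1600000 in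
theorem ShipOneXY_spec : Claim_equal_ShipOneXY := by
  intro S1 S2 _hdom hpre
  unfold Spec_ShipOneXY
  rw [shipOneXY_eq_flatMap, adjChars_eq_map_piece, adjChars_eq_map_piece,
    ← adjusted_toList, ← adjusted_toList]
  unfold ShipOneXY_alt
  cases hS1 : S1 with
  | nil => simp [show pvAdjusted ([] : List String) = [] from rfl]
  | cons a t =>
    cases hS2 : S2 with
    | nil => simp [show pvAdjusted ([] : List String) = [] from rfl, List.flatMap]
    | cons b u =>
      simp only [List.isEmpty_cons, Bool.or_self, Bool.false_eq_true, if_false]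
      rw [List.flatMap_map, List.flatMap_map, List.flatMap_map]
      simp only [List.map_map]
      rcases hpre with h1 | h2 | ⟨h1, h2⟩
      · simp [hS1] at h1
      · simp [hS2] at h2
      refine flatMap_congr_mem _ _ _ (fun s hs => ?_)
      refine List.map_congr_left (fun s' hs' => ?_)
      simp only [Function.comp_apply]
      have hne : s.toList ≠ [] := adjusted_ne_nil _ (hS1 ▸ h1) s hs
      rw [cap_append _ _ hne]
      unfold pvCapFirst pvLowerStr
      rw [PySem.Chars.slice_eq_listSlice, PySem.Chars.slice_eq_listSlice,
        PySem.List.slice_to _ (by omega), PySem.List.slice_from_one,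
        show ((1:Int).toNat) = 1 from rfl]
      simp
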